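-- pv_equiv track=rewrite | github.com/pavanperepa/legacygym | server/tasks/align_columns.py | _reference_align_columns
-- ===== SOURCE A (Python) =====
-- from itertools import zip_longest
--
-- def _justify(value: str, width: int, alignment: str) -> str:
--     if alignment == "left":
--         return value.ljust(width)
--     if alignment == "right":
--         return value.rjust(width)
--     if alignment == "center":
--         return value.center(width)
--     raise ValueError(f"Unsupported alignment: {alignment}")
--
-- def _reference_align_columns(lines: list[str], alignment: str) -> list[str]:
--     rows = [line.rstrip("$").split("$") for line in lines]
--     widths = [
--         max(len(cell) for cell in column)
--         for column in zip_longest(*rows, fillvalue="")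
--     ]
--     return [
--         " ".join(
--             _justify(cell, widths[index], alignment)
--             for index, cell in enumerate(row)
--         ).rstrip()
--         for row in rows
--     ]
-- ===== SOURCE B (Python) =====
-- def _justify(value: str, width: int, alignment: str) -> str:
--     if alignment == "left":
--         return value.ljust(width)
--     if alignment == "right":
--         return value.rjust(width)
--     if alignment == "center":
--         return value.center(width)
--     raise ValueError(f"Unsupported alignment: {alignment}")
--
-- def _peel(rows, alignment):
--     # recursion on columns: justify the first cell of every row against the
--     # first-column width, then recurse on the tails and glue with one space
--     if all(not row for row in rows):
--         return ["" for _ in rows]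
--     width = max(len(row[0]) if row else 0 for row in rows)
--     rest = _peel([row[1:] for row in rows], alignment)
--     out = []
--     for row, tail in zip(rows, rest):
--         if not row:
--             out.append("")
--         elif len(row) == 1:
--             out.append(_justify(row[0], width, alignment))
--         else:
--             out.append(_justify(row[0], width, alignment) + " " + tail)
--     return out
--
-- def _reference_align_columns(lines: list[str], alignment: str) -> list[str]:
--     rows = [line.rstrip("$").split("$") for line in lines]
--     return [s.rstrip() for s in _peel(rows, alignment)]
-- ===== Notes on version B (the rewrite author's own statement) =====
-- stated objective: alternative
-- what changed: Replaces A's two-stage transpose-then-format pipeline (zip_longest to materialize columns, a widths table, then an indexed join per row) by a column-peeling recursion: justify the head cell of every row against the first-column width, recurse on the row tails, and glue each justified head to the recursively aligned remainder with one space; no widths table or enumerate indexing exists in B.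
import Mathlib
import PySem

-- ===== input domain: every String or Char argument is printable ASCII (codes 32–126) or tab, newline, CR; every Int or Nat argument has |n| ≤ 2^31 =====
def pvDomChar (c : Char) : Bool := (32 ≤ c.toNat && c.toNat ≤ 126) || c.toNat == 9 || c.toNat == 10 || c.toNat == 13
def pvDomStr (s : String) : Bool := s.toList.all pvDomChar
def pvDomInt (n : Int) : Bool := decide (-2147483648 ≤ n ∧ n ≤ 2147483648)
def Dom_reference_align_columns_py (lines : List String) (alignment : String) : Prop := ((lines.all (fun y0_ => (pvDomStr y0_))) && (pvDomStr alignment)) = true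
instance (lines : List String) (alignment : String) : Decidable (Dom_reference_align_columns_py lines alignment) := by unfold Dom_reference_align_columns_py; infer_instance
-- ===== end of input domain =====

-- B replaces A's transpose-then-format pipeline (zip_longest columns, widths table,
-- indexed join per row) by a column-peeling recursion: justify every head cell against
-- the first-column width, recurse on the tails, glue with one space; objective: alternative.

-- ===== PORT A =====
-- line.rstrip("$") : drop trailing '$' characters (exact hand port; shared by both sides,
-- since both Pythons parse with the identical expression)
def rstripDollar (cs : List Char) : List Char := (cs.reverse.dropWhile (fun c => c == '$')).reverse

-- str.ljust / str.rjust / str.center, exact CPython behaviour (Nat subtraction = CPython's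
-- "return a copy when width <= len" check; center's left margin is marg//2 + (marg & width & 1))
def pyLjust (cs : List Char) (w : Nat) : List Char := cs ++ List.replicate (w - cs.length) ' '
def pyRjust (cs : List Char) (w : Nat) : List Char := List.replicate (w - cs.length) ' ' ++ cs
def pyCenter (cs : List Char) (w : Nat) : List Char :=
  let marg := w - cs.length
  let left := marg / 2 + (marg &&& w &&& 1)
  List.replicate left ' ' ++ cs ++ List.replicate (marg - left) ' '

-- _justify; the final else is `raise ValueError` in Python — unreachable under Pre_, returns value.
-- Identical in Source A and Source B, so both ports share it.
def justifyA (value : List Char) (width : Nat) (alignment : String) : List Char :=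
  if alignment = "left" then pyLjust value width
  else if alignment = "right" then pyRjust value width
  else if alignment = "center" then pyCenter value width
  else value

def reference_align_columns_py (lines : List String) (alignment : String) : List String :=
  let rows : List (List (List Char)) :=
    lines.map (fun line => PySem.Chars.splitOn (rstripDollar line.toList) ['$'])
  -- zip_longest(*rows, fillvalue="") : one tuple per index k < max row length
  let m : Nat := rows.foldl (fun a r => max a r.length) 0
  let widths : List Nat :=
    (List.range m).map (fun k => ((rows.map (fun r => r.getD k [])).map List.length).foldl max 0)
  rows.map (fun row =>
    String.ofList (PySem.Chars.rstrip (PySem.Chars.join [' ']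
      (row.zipIdx.map (fun p => justifyA p.1 (widths.getD p.2 0) alignment)))))

-- ===== PORT B =====
-- termination helper for `peel`, cited by its decreasing_by
theorem peel_measure_lt (rows : List (List (List Char)))
    (h : ¬ rows.all (fun r => r.isEmpty) = true) :
    ((rows.map (fun r => r.drop 1)).map List.length).sum < (rows.map List.length).sum := by
  rw [List.map_map]
  induction rows with
  | nil => simp at h
  | cons r rs ih =>
    simp only [List.map_cons, List.sum_cons, Function.comp_def]
    by_cases hr : r.isEmpty = true
    · have hrs : ¬ rs.all (fun r => r.isEmpty) = true := by
        simp only [List.all_cons, hr, Bool.true_and] at h; exact h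
      have hnil : r = [] := List.isEmpty_iff.mp hr
      subst hnil
      have := ih hrs
      simp only [Function.comp_def] at this
      simpa using this
    · have h1 : (r.drop 1).length < r.length := by
        cases r with
        | nil => simp at hr
        | cons a t => simp
      have h2 : (rs.map (fun r => (r.drop 1).length)).sum ≤ (rs.map List.length).sum :=
        List.sum_le_sum (fun x _ => by simp)
      omega

-- _peel: recursion on columns (justify heads, recurse on tails, glue with one space)
def peel (rows : List (List (List Char))) (alignment : String) : List (List Char) :=
  if _h : rows.all (fun r => r.isEmpty) = true then rows.map (fun _ => [])
  else
    let width : Nat := (rows.map (fun r => (r.headD []).length)).foldl max 0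
    let rest := peel (rows.map (fun r => r.drop 1)) alignment
    (rows.zip rest).map (fun p =>
      match p.1 with
      | [] => []
      | [c] => justifyA c width alignment
      | c :: _ :: _ => justifyA c width alignment ++ ' ' :: p.2)
  termination_by (rows.map List.length).sum
  decreasing_by simpa using peel_measure_lt rows (by assumption)

def reference_align_columns_py_alt (lines : List String) (alignment : String) : List String :=
  let rows : List (List (List Char)) :=
    lines.map (fun line => PySem.Chars.splitOn (rstripDollar line.toList) ['$'])
  (peel rows alignment).map (fun s => String.ofList (PySem.Chars.rstrip s))

-- ===== PRECONDITION & SPEC =====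
-- Pre_ excludes exactly the inputs on which the Pythons raise ValueError: an unsupported
-- alignment reaches _justify as soon as there is at least one line (every line splits into ≥ 1 cell).
def Pre_reference_align_columns_py (lines : List String) (alignment : String) : Prop :=
  lines = [] ∨ alignment = "left" ∨ alignment = "right" ∨ alignment = "center"
instance (lines : List String) (alignment : String) : Decidable (Pre_reference_align_columns_py lines alignment) := by unfold Pre_reference_align_columns_py; infer_instance
def pvWitness_reference_align_columns_py : List String × String := (["a$bb$c", "dd$e"], "center")

def Spec_reference_align_columns_py (lines : List String) (alignment : String) (out : List String) : Prop := out = reference_align_columns_py_alt lines alignment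
instance (lines : List String) (alignment : String) (out : List String) : Decidable (Spec_reference_align_columns_py lines alignment out) := by unfold Spec_reference_align_columns_py; infer_instance

-- ===== CLAIM (what is proved, stated in full; the proofs are below) =====
def Claim_equal_reference_align_columns_py : Prop := ∀ (lines : List String) (alignment : String), Dom_reference_align_columns_py lines alignment → Pre_reference_align_columns_py lines alignment → Spec_reference_align_columns_py lines alignment (reference_align_columns_py lines alignment)

-- ===== LEMMAS AND PROOFS =====

-- A's per-column width, as a function of the column index
def colW (rows : List (List (List Char))) (k : Nat) : Nat :=
  ((rows.map (fun r => r.getD k [])).map List.length).foldl max 0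

theorem colW_tail (rows : List (List (List Char))) (k : Nat) :
    colW (rows.map (fun r => r.tail)) k = colW rows (k + 1) := by
  unfold colW
  simp only [List.map_map]
  congr 1
  apply List.map_congr_left
  intro r _
  simp only [Function.comp_def]
  congr 1
  cases r <;> rfl

theorem colW_zero (rows : List (List (List Char))) :
    (rows.map (fun r => (r.headD []).length)).foldl max 0 = colW rows 0 := by
  unfold colW
  rw [List.map_map]
  congr 1
  apply List.map_congr_left
  intro r _
  cases r <;> rfl

-- peel computes exactly A's per-row join against the column widths
theorem peel_eq (alignment : String) (rows : List (List (List Char))) :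
    peel rows alignment = rows.map (fun row =>
      PySem.Chars.join [' '] (row.zipIdx.map (fun p => justifyA p.1 (colW rows p.2) alignment))) := by
  rw [peel]
  split
  · rename_i h
    apply List.map_congr_left
    intro row hrow
    have : row = [] := List.isEmpty_iff.mp (by
      have := List.all_eq_true.mp h row hrow; simpa using this)
    subst this
    simp [PySem.Chars.join_nil]
  · rename_i h
    rw [peel_eq alignment (rows.map (fun r => r.drop 1))]
    dsimp only
    rw [List.map_map, ← List.map_prod_left_eq_zip, List.map_map]
    apply List.map_congr_left
    intro row _
    simp only [Function.comp_def]
    cases row with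
    | nil => simp [PySem.Chars.join_nil]
    | cons c t =>
      cases t with
      | nil =>
        have hz : (([c] : List (List Char))).zipIdx = [(c, 0)] := rfl
        rw [hz, List.map_cons, List.map_nil, PySem.Chars.join_singleton, colW_zero]
      | cons c2 cs =>
        simp only [List.drop_succ_cons, List.drop_zero]
        have hz : ((c :: c2 :: cs : List (List Char))).zipIdx = (c, 0) :: (c2 :: cs).zipIdx 1 := rfl
        have hj : ∀ (x y : List Char) (ts : List (List Char)),
            PySem.Chars.join [' '] (x :: y :: ts) = x ++ ' ' :: PySem.Chars.join [' '] (y :: ts) := by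
          intro x y ts
          rw [PySem.Chars.join_cons_cons]
          simp
        have hz1 : ((c2 :: cs) : List (List Char)).zipIdx = (c2, 0) :: cs.zipIdx 1 := rfl
        rw [hz, List.zipIdx_succ, List.map_cons, List.map_map, hz1, List.map_cons, List.map_cons, hj, colW_zero]
        congr 3
        all_goals simp [colW_tail]
  termination_by (rows.map List.length).sum
  decreasing_by simpa using peel_measure_lt rows (by assumption)

-- ===== VERDICT (by name: the statement is the Claim_ definition above) =====
theorem reference_align_columns_py_spec : Claim_equal_reference_align_columns_py := by
  intro lines alignment _ _
  unfold Spec_reference_align_columns_py reference_align_columns_py reference_align_columns_py_alt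
  dsimp only
  rw [peel_eq, List.map_map, List.map_map, List.map_map]
  apply List.map_congr_left
  intro line hline
  simp only [Function.comp_def]
  congr 3
  apply List.map_congr_left
  intro p hp
  congr 1
  -- widths.getD p.2 0 = colW rows p.2, since p.2 < row.length ≤ m
  have hrow : PySem.Chars.splitOn (rstripDollar line.toList) ['$']
      ∈ lines.map (fun line => PySem.Chars.splitOn (rstripDollar line.toList) ['$']) :=
    List.mem_map_of_mem hline
  have hlt : p.2 < (PySem.Chars.splitOn (rstripDollar line.toList) ['$']).length := by
    have := List.mem_zipIdx hp; omega
  have hle : (PySem.Chars.splitOn (rstripDollar line.toList) ['$']).length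
      ≤ (lines.map (fun line => PySem.Chars.splitOn (rstripDollar line.toList) ['$'])).foldl (fun a r => max a r.length) 0 :=
    (PySem.List.le_foldl_max_nat _ List.length 0).2 _ hrow
  rw [List.getD_eq_getElem?_getD]
  simp only [List.getElem?_map]
  have hm : p.2 < (lines.map (fun line => PySem.Chars.splitOn (rstripDollar line.toList) ['$'])).foldl (fun a r => max a r.length) 0 := by omega
  simp [hm, colW]
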